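-- pv_equiv track=rewrite | github.com/saikrishna1681/exam_website | exam_backend/exam/useful_functions.py | grade_exam
-- ===== SOURCE A (Python) =====
-- def decode_student_response(encoded_response):
--     return encoded_response.split("#")
--
-- def decode_answerkey(encoded_key):
--     return encoded_key.split("#")
--
-- def decode_marking_scheme(encoded_scheme):
--     first=encoded_scheme.split("#")
--     second=[]
--     for i in first:
--         second.append([int(x) for x in i.split("_")])
--     return second
--
-- def grade_answersheet(student_response,decoded_marking,decoded_answerkey):
--     #decoded_answerkey=decoded_answerkey(answer_key)
--     decoded_response=decode_student_response(student_response)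
--     #decoded_marking=decode_marking_scheme(marking_scheme)
--     marks=0
--     l=len(decoded_marking)
--     for i in range(0,l):
--         if decoded_answerkey[i]=="add":
--             marks+=int(decoded_marking[i][0])
--         elif decoded_response[i]=="":
--             pass
--         elif decoded_response[i] in decoded_answerkey[i]:
--             marks+=int(decoded_marking[i][0])
--         else:
--             marks-=int(decoded_marking[i][1])
--     return marks
--
-- def grade_exam(student_responses_dict,marking_scheme,answer_key):
--     decoded_answerkey=decode_answerkey(answer_key)
--     decoded_marking=decode_marking_scheme(marking_scheme)
--     marks_dict=dict([])
--     for i in student_responses_dict: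
--         response_list=student_responses_dict[i]
--         marks_dict[i]=grade_answersheet(response_list,decoded_marking,decoded_answerkey)
--     mark_rank_list=sort_marks(marks_dict)
--     mark_rank_dict=dict([])
--     for i in mark_rank_list:
--         mark_rank_dict[i[0]]=[i[1],i[2]]
--     return mark_rank_dict
--
-- def sort_marks(marks_dict):
--     marks_list=[]
--     for i in marks_dict:
--         marks_list.append([i,marks_dict[i]])
--     marks_list.sort(key = lambda x :x[1],reverse=True)
--     mark_rank_list=[]
--     rank=0
--     marks=float('inf')
--     for i in marks_list:
--         if i[1]<marks:
--             marks=i[1]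
--             rank=rank+1
--         mark_rank_list.append([i[0],i[1],rank])
--     return mark_rank_list
-- ===== SOURCE B (Python) =====
-- def grade_exam(student_responses_dict, marking_scheme, answer_key):
--     keys = answer_key.split("#")
--     rows = [[int(x) for x in seg.split("_")] for seg in marking_scheme.split("#")]
--
--     def score(response):
--         total = 0
--         for ans, row, got in zip(keys, rows, response.split("#")):
--             if ans == "add":
--                 total += row[0]
--             elif got == "":
--                 pass
--             elif got in ans:
--                 total += row[0]
--             else:
--                 total -= row[1]
--         return total
--
--     scored = sorted(((s, score(r)) for s, r in student_responses_dict.items()),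
--                     key=lambda p: p[1], reverse=True)
--     distinct = set(m for _, m in scored)
--     return {s: [m, 1 + sum(1 for d in distinct if d > m)] for s, m in scored}
-- ===== Notes on version B (the rewrite author's own statement) =====
-- stated objective: alternative
-- what changed: Scoring walks zip(keys,rows,response-fields) instead of index arithmetic over range(len), and the dense rank is computed per student as 1 + (number of distinct marks greater than the student's mark) over the mark set, replacing A's stateful running-rank sweep (rank/inf sentinel) over the sorted list and its two intermediate dict/list rebuilds.
-- outside the precondition, e.g. on grade_exam({'s': ''}, '1_1#1_1', 'add#add'): A returns {'s': [2, 1]}, B returns {'s': [1, 1]}; on grade_exam({'s': '#'}, '2#3', 'a#add'): A returns {'s': [3, 1]}, B returns {'s': [3, 1]}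
import Mathlib
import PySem

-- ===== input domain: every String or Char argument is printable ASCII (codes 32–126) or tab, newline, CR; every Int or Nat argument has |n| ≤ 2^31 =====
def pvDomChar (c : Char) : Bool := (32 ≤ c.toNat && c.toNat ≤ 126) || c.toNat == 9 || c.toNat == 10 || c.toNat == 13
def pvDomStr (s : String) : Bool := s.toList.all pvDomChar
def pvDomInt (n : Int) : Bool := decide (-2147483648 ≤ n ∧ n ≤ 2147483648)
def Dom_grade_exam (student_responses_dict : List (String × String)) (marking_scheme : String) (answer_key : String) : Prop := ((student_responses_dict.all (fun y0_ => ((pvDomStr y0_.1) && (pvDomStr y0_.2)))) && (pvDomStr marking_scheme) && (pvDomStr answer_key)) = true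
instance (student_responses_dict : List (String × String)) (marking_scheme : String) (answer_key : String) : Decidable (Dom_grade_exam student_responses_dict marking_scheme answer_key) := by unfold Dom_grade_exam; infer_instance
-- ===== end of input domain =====

-- B replaces A's stateful running-rank sweep by a per-student count of strictly greater
-- distinct marks (objective: alternative decomposition, not claimed faster).
-- Both ports are about the RETURN value only; A mutates nothing observable.

-- ===== PORT A =====
-- Indexing/`int()` that would raise in Python is rendered with `pyGetD`/`.getD` defaults;
-- exactly those inputs are excluded by Pre_grade_exam below.
def decode_student_response (encoded_response : String) : List String :=
  (PySem.Str.split? encoded_response "#").getD []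

def decode_answerkey (encoded_key : String) : List String :=
  (PySem.Str.split? encoded_key "#").getD []

def decode_marking_scheme (encoded_scheme : String) : List (List Int) :=
  ((PySem.Str.split? encoded_scheme "#").getD []).foldl
    (fun second i =>
      second ++ [((PySem.Str.split? i "_").getD []).map (fun x => (PySem.Int.ofStr? x).getD 0)]) []

def grade_answersheet (student_response : String) (decoded_marking : List (List Int))
    (decoded_answerkey : List String) : Int :=
  let decoded_response := decode_student_response student_response
  (PySem.List.pyRange 0 (PySem.List.len decoded_marking)).foldl
    (fun marks i =>
      if PySem.List.pyGetD decoded_answerkey i "" = "add" then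
        marks + PySem.List.pyGetD (PySem.List.pyGetD decoded_marking i []) 0 0
      else if PySem.List.pyGetD decoded_response i "" = "" then marks
      else if PySem.Str.isIn (PySem.List.pyGetD decoded_response i "")
          (PySem.List.pyGetD decoded_answerkey i "") then
        marks + PySem.List.pyGetD (PySem.List.pyGetD decoded_marking i []) 0 0
      else marks - PySem.List.pyGetD (PySem.List.pyGetD decoded_marking i []) 1 0) 0

-- `marks = float('inf')` is used only as a sentinel compared against int marks:
-- modelled exactly as `Option Int` with `none` = +inf.
def ltCur (x : Int) (cur : Option Int) : Bool :=
  match cur with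
  | none => true
  | some m => decide (x < m)

-- loop body of sort_marks' rank sweep, named so the proofs can speak about it
def sweepStep (st : List (String × Int × Int) × Int × Option Int) (i : String × Int) :
    List (String × Int × Int) × Int × Option Int :=
  if ltCur i.2 st.2.2 then
    (st.1 ++ [(i.1, i.2, st.2.1 + 1)], st.2.1 + 1, some i.2)
  else
    (st.1 ++ [(i.1, i.2, st.2.1)], st.2.1, st.2.2)

def sort_marks (marks_dict : PySem.Dict String Int) : List (String × Int × Int) :=
  let marks_list := marks_dict.keys.foldl (fun acc i => acc ++ [(i, marks_dict.getD i 0)]) []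
  let sortedL := PySem.List.sorted marks_list (fun x => x.2) true
  (sortedL.foldl sweepStep (([] : List (String × Int × Int)), (0 : Int), (none : Option Int))).1

def grade_exam (student_responses_dict : List (String × String)) (marking_scheme : String)
    (answer_key : String) : List (String × List Int) :=
  let decoded_answerkey := decode_answerkey answer_key
  let decoded_marking := decode_marking_scheme marking_scheme
  let srd := PySem.Dict.ofList student_responses_dict
  let marks_dict := srd.keys.foldl
    (fun d i => d.insert i (grade_answersheet (srd.getD i "") decoded_marking decoded_answerkey))
    PySem.Dict.empty
  let mark_rank_list := sort_marks marks_dict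
  (mark_rank_list.foldl (fun d i => d.insert i.1 [i.2.1, i.2.2]) PySem.Dict.empty).items

-- ===== PORT B =====
def grade_exam_alt (student_responses_dict : List (String × String)) (marking_scheme : String)
    (answer_key : String) : List (String × List Int) :=
  let keys := (PySem.Str.split? answer_key "#").getD []
  let rows := ((PySem.Str.split? marking_scheme "#").getD []).map
    (fun seg => ((PySem.Str.split? seg "_").getD []).map (fun x => (PySem.Int.ofStr? x).getD 0))
  let score : String → Int := fun response =>
    (keys.zip (rows.zip ((PySem.Str.split? response "#").getD []))).foldl
      (fun total t =>
        if t.1 = "add" then total + PySem.List.pyGetD t.2.1 0 0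
        else if t.2.2 = "" then total
        else if PySem.Str.isIn t.2.2 t.1 then total + PySem.List.pyGetD t.2.1 0 0
        else total - PySem.List.pyGetD t.2.1 1 0) 0
  let scored := PySem.List.sorted
    ((PySem.Dict.ofList student_responses_dict).items.map (fun p => (p.1, score p.2)))
    (fun p => p.2) true
  let distinct := PySem.Set.ofList (scored.map (fun p => p.2))
  (scored.foldl (fun d p =>
      d.insert p.1 [p.2, 1 + distinct.foldl (fun n dm => if p.2 < dm then n + 1 else n) (0 : Int)])
    PySem.Dict.empty).items

-- ===== PRECONDITION & SPEC =====
-- Pre_ excludes: (a) inputs whose marking scheme has a token int() rejects (A raises ValueError);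
-- (b) lists encoding a "dict" with duplicate student keys (not a Python dict);
-- (c) inputs where, with at least one student, the answer key or some student's response has
-- fewer '#'-fields than the marking scheme, or some scheme row lacks the penalty entry: there A
-- raises IndexError except in the corner where every out-of-range question is 'add' (resp. the
-- penalty branch never fires), a value that depends on incidental branch order.
def Pre_grade_exam (student_responses_dict : List (String × String)) (marking_scheme : String)
    (answer_key : String) : Prop :=
  (student_responses_dict.map Prod.fst).Nodup ∧
  (∀ seg ∈ (PySem.Str.split? marking_scheme "#").getD [],
    ∀ tok ∈ (PySem.Str.split? seg "_").getD [], (PySem.Int.ofStr? tok).isSome = true) ∧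
  (student_responses_dict = [] ∨
    (((PySem.Str.split? marking_scheme "#").getD []).length ≤
        ((PySem.Str.split? answer_key "#").getD []).length ∧
      ∀ seg ∈ (PySem.Str.split? marking_scheme "#").getD [],
        2 ≤ ((PySem.Str.split? seg "_").getD []).length)) ∧
  (∀ p ∈ student_responses_dict,
    ((PySem.Str.split? marking_scheme "#").getD []).length ≤
      ((PySem.Str.split? p.2 "#").getD []).length)
instance (student_responses_dict : List (String × String)) (marking_scheme : String) (answer_key : String) : Decidable (Pre_grade_exam student_responses_dict marking_scheme answer_key) := by unfold Pre_grade_exam; infer_instance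

def pvWitness_grade_exam : (List (String × String)) × String × String :=
  ([("alice", "a#b"), ("bob", "#b")], "2_1#3_1", "a#add")

def Spec_grade_exam (student_responses_dict : List (String × String)) (marking_scheme : String) (answer_key : String) (out : List (String × List Int)) : Prop := out = grade_exam_alt student_responses_dict marking_scheme answer_key
instance (student_responses_dict : List (String × String)) (marking_scheme : String) (answer_key : String) (out : List (String × List Int)) : Decidable (Spec_grade_exam student_responses_dict marking_scheme answer_key out) := by unfold Spec_grade_exam; infer_instance

-- ===== CLAIM (what is proved, stated in full; the proofs are below) =====
def Claim_equal_grade_exam : Prop := ∀ (student_responses_dict : List (String × String)) (marking_scheme : String) (answer_key : String), Dom_grade_exam student_responses_dict marking_scheme answer_key → Pre_grade_exam student_responses_dict marking_scheme answer_key → Spec_grade_exam student_responses_dict marking_scheme answer_key (grade_exam student_responses_dict marking_scheme answer_key)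

-- ===== LEMMAS AND PROOFS =====

lemma zip3_eq_map_range (keys : List String) (rows : List (List Int)) (parts : List String)
    (h1 : rows.length ≤ keys.length) (h2 : rows.length ≤ parts.length) :
    keys.zip (rows.zip parts) =
      (List.range rows.length).map (fun k => (keys.getD k "", rows.getD k [], parts.getD k "")) := by
  apply List.ext_getElem
  · simp; omega
  · intro k hk hk'
    simp [List.getElem_zip] at hk ⊢
    refine ⟨?_, ?_, ?_⟩ <;> rw [List.getElem?_eq_getElem (by omega)] <;> rfl

lemma score_eq (resp : String) (rows : List (List Int)) (keys : List String)
    (h1 : rows.length ≤ keys.length)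
    (h2 : rows.length ≤ ((PySem.Str.split? resp "#").getD []).length) :
    grade_answersheet resp rows keys =
      (keys.zip (rows.zip ((PySem.Str.split? resp "#").getD []))).foldl
        (fun total t =>
          if t.1 = "add" then total + PySem.List.pyGetD t.2.1 0 0
          else if t.2.2 = "" then total
          else if PySem.Str.isIn t.2.2 t.1 then total + PySem.List.pyGetD t.2.1 0 0
          else total - PySem.List.pyGetD t.2.1 1 0) 0 := by
  unfold grade_answersheet decode_student_response
  set parts := (PySem.Str.split? resp "#").getD [] with hparts
  rw [zip3_eq_map_range keys rows parts h1 h2, List.foldl_map]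
  rw [PySem.List.pyRange_one, PySem.List.len_eq]
  simp only [sub_zero, Int.toNat_natCast, List.foldl_map]
  apply PySem.List.foldl_congr_mem
  intro acc k hkmem
  have hk : k < rows.length := List.mem_range.mp hkmem
  simp only [zero_add, PySem.List.pyGetD_natCast, PySem.List.pyGetD_zero]

def cntGt (marks : List Int) (m : Int) : Int :=
  ((PySem.Set.ofList marks).countP (fun d => m < d) : Int)

lemma countP_ofList_congr (p : Int → Bool) (l₁ l₂ : List Int)
    (h : ∀ a : Int, a ∈ l₁ ↔ a ∈ l₂) :
    (PySem.Set.ofList l₁).countP p = (PySem.Set.ofList l₂).countP p := by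
  apply List.Perm.countP_eq
  rw [List.perm_ext_iff_of_nodup (PySem.Set.nodup_ofList l₁) (PySem.Set.nodup_ofList l₂)]
  intro a; simp [PySem.Set.mem_ofList, h a]

lemma countP_ofList_cons_not_mem (p : Int → Bool) (a : Int) (l : List Int) (ha : a ∉ l) :
    (PySem.Set.ofList (a :: l)).countP p =
      (if p a then 1 else 0) + (PySem.Set.ofList l).countP p := by
  have hperm : (PySem.Set.ofList (a :: l)).Perm (a :: PySem.Set.ofList l) := by
    rw [List.perm_ext_iff_of_nodup (PySem.Set.nodup_ofList _)
      (by simp [List.nodup_cons, PySem.Set.mem_ofList, ha, PySem.Set.nodup_ofList])]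
    intro b; simp [PySem.Set.mem_ofList]
  rw [hperm.countP_eq, List.countP_cons]
  by_cases hp : p a = true
  · simp [hp]
    omega
  · simp [hp]

def ranked (r : Int) (S : List Int) (s : List (String × Int)) : List (String × Int × Int) :=
  s.map (fun p => (p.1, p.2, r + cntGt S p.2))

lemma ranked_cons (r : Int) (S : List Int) (p : String × Int) (t : List (String × Int)) :
    ranked r S (p :: t) = (p.1, p.2, r + cntGt S p.2) :: ranked r S t := rfl

lemma ranked_congr (r r' : Int) (S T : List Int) (t : List (String × Int))
    (h : ∀ x ∈ t, r + cntGt S x.2 = r' + cntGt T x.2) : ranked r S t = ranked r' T t :=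
  List.map_congr_left (fun x hx => by rw [Prod.ext_iff]; exact ⟨rfl, by rw [Prod.ext_iff]; exact ⟨rfl, h x hx⟩⟩)

lemma sweep_go (s : List (String × Int)) :
    ∀ (acc : List (String × Int × Int)) (r : Int) (m0 : Int),
      s.Pairwise (fun a b => b.2 ≤ a.2) →
      (∀ p ∈ s, p.2 ≤ m0) → (∀ h : s ≠ [], (s.head h).2 = m0) →
      (s.foldl sweepStep (acc, r, some m0)).1 =
        acc ++ ranked r (s.map (fun q => q.2)) s := by
  induction s with
  | nil => intro acc r m0 _ _ _; simp [ranked]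
  | cons p t ih =>
    intro acc r m0 hpw hle hhead
    have hm0 : p.2 = m0 := hhead (by simp)
    have hpwt : t.Pairwise (fun a b => b.2 ≤ a.2) := hpw.of_cons
    have hlet : ∀ q ∈ t, q.2 ≤ p.2 := fun q hq => (List.pairwise_cons.mp hpw).1 q hq
    have hcnt0 : cntGt ((p :: t).map (fun q => q.2)) p.2 = 0 := by
      unfold cntGt
      rw [Nat.cast_eq_zero, List.countP_eq_zero]
      intro d hd
      rw [PySem.Set.mem_ofList] at hd
      simp only [List.map_cons, List.mem_cons, List.mem_map] at hd
      rcases hd with h | ⟨q, hq, rfl⟩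
      · simp [h]
      · simpa using not_lt.mpr (hlet q hq)
    have hstep : sweepStep (acc, r, some m0) p = (acc ++ [(p.1, p.2, r)], r, some p.2) := by
      simp [sweepStep, ltCur, hm0]
    rw [List.foldl_cons, hstep]
    subst hm0
    rw [ranked_cons, hcnt0, add_zero,
      show acc ++ ((p.1, p.2, r) :: ranked r ((p :: t).map (fun q => q.2)) t)
        = (acc ++ [(p.1, p.2, r)]) ++ ranked r ((p :: t).map (fun q => q.2)) t by simp]
    cases t with
    | nil => simp [ranked]
    | cons q t' =>
      have hqmem : q ∈ q :: t' := by simp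
      by_cases hq2 : q.2 = p.2
      · rw [ih (acc ++ [(p.1, p.2, r)]) r p.2 hpwt hlet (by intro h; simpa using hq2)]
        congr 1
        apply ranked_congr
        intro x hx
        congr 1
        unfold cntGt
        rw [countP_ofList_congr _ ((q :: t').map (fun q => q.2)) ((p :: q :: t').map (fun q => q.2))
          (by intro a
              simp only [List.map_cons, List.mem_cons]
              constructor
              · intro h; tauto
              · rintro (h | h)
                · rw [h, ← hq2]; left; rfl
                · tauto)]
      · have hlt : q.2 < p.2 := lt_of_le_of_ne (hlet q hqmem) hq2
        have hshift : (q :: t').foldl sweepStep (acc ++ [(p.1, p.2, r)], r, some p.2)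
            = (q :: t').foldl sweepStep (acc ++ [(p.1, p.2, r)], r + 1, some q.2) := by
          rw [List.foldl_cons, List.foldl_cons]
          congr 1
          simp [sweepStep, ltCur, hlt]
        have hlet' : ∀ x ∈ q :: t', x.2 ≤ q.2 := by
          intro x hx
          rcases List.mem_cons.mp hx with rfl | hx'
          · exact le_refl _
          · exact (List.pairwise_cons.mp hpwt).1 x hx'
        rw [hshift, ih (acc ++ [(p.1, p.2, r)]) (r + 1) q.2 hpwt hlet' (by intro h; rfl)]
        congr 1
        apply ranked_congr
        intro x hx
        have hpnot : p.2 ∉ (q :: t').map (fun q => q.2) := by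
          simp only [List.mem_map, not_exists]
          rintro y ⟨hy, hy2⟩
          have := hlet' y hy
          omega
        have hxlt : x.2 < p.2 := lt_of_le_of_lt (hlet' x hx) hlt
        have hsplit : cntGt ((p :: q :: t').map (fun q => q.2)) x.2
            = 1 + cntGt ((q :: t').map (fun q => q.2)) x.2 := by
          unfold cntGt
          rw [show ((p :: q :: t').map (fun q => q.2))
              = p.2 :: ((q :: t').map (fun q => q.2)) from rfl,
            countP_ofList_cons_not_mem _ _ _ hpnot]
          have hd : decide (x.2 < p.2) = true := by simpa using hxlt
          simp [hd]
        rw [hsplit]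
        ring

lemma sweep_top (s : List (String × Int)) (hs : s.Pairwise (fun a b => b.2 ≤ a.2)) :
    (s.foldl sweepStep (([] : List (String × Int × Int)), (0 : Int), (none : Option Int))).1 =
      s.map (fun p => (p.1, p.2, 1 + cntGt (s.map (fun q => q.2)) p.2)) := by
  cases s with
  | nil => simp
  | cons p t =>
    have h1 : (p :: t).foldl sweepStep ([], 0, none)
        = (p :: t).foldl sweepStep ([], 1, some p.2) := by
      rw [List.foldl_cons, List.foldl_cons]
      congr 1
      simp [sweepStep, ltCur]
    rw [h1, sweep_go (p :: t) [] 1 p.2 hs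
      (fun q hq => by
        rcases List.mem_cons.mp hq with rfl | hq'
        · exact le_refl _
        · exact (List.pairwise_cons.mp hs).1 q hq') (fun h => rfl)]
    simp [ranked]

def finalOf (SL : List (String × Int)) : List (String × List Int) :=
  (PySem.List.sorted SL (fun x => x.2) true).map
    (fun p => (p.1, [p.2,
      1 + cntGt ((PySem.List.sorted SL (fun x => x.2) true).map (fun q => q.2)) p.2]))

lemma items_ofList_nodup (l : List (String × String)) (hnd : (l.map Prod.fst).Nodup) :
    (PySem.Dict.ofList l).items = l := by
  show (l.foldl (fun d p => d.insert p.1 p.2) PySem.Dict.empty).items = l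
  rw [PySem.Dict.items_foldl_insert_fresh l (fun p => p.1) (fun p => p.2) PySem.Dict.empty
    (fun a _ => PySem.Dict.contains_empty _) hnd]
  simp
  rfl

lemma gradeA_eq (l : List (String × String)) (ms ak : String)
    (hnd : (l.map Prod.fst).Nodup) :
    grade_exam l ms ak = finalOf (l.map (fun p =>
      (p.1, grade_answersheet p.2 (decode_marking_scheme ms) (decode_answerkey ak)))) := by
  have hofl := items_ofList_nodup l hnd
  have hkeysl : (PySem.Dict.ofList l).keys = l.map Prod.fst := by
    show (PySem.Dict.ofList l).items.map Prod.fst = _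
    rw [hofl]
  have hknd : (PySem.Dict.ofList l).keys.Nodup := by rw [hkeysl]; exact hnd
  set dm := decode_marking_scheme ms with hdmdef
  set dak := decode_answerkey ak with hdakdef
  set srd := PySem.Dict.ofList l with hsrd
  set v : String → Int := fun i => grade_answersheet (srd.getD i "") dm dak with hv
  set marks_dict := srd.keys.foldl (fun d i => d.insert i (v i)) PySem.Dict.empty with hmdd
  show (List.foldl (fun d i => d.insert i.1 [i.2.1, i.2.2]) PySem.Dict.empty
      (sort_marks marks_dict)).items = _
  -- marks_dict's items are the scored students, in input order
  have hmd : marks_dict.items = l.map (fun p => (p.1, grade_answersheet p.2 dm dak)) := by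
    rw [hmdd, hkeysl,
      PySem.Dict.items_foldl_insert_fresh (l.map Prod.fst) (fun i => i) v PySem.Dict.empty
        (fun a _ => PySem.Dict.contains_empty _) (by simpa using hnd)]
    simp only [List.map_map]
    apply List.map_congr_left
    intro p hp
    have hpm : (p.1, p.2) ∈ srd.items := by rw [hsrd, hofl]; simpa using hp
    have := PySem.Dict.getD_of_mem_items srd hpm hknd ""
    simp [Function.comp, hv, this]
  have hmknd : marks_dict.keys.Nodup := by
    rw [hmdd]
    exact PySem.Dict.nodup_keys_foldl_insert _ (fun _ i => v i) _ (by rw [PySem.Dict.keys_empty]; exact List.nodup_nil)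
  -- sort_marks: the pre-sort list is exactly marks_dict.items
  have hml : marks_dict.keys.foldl (fun acc i => acc ++ [(i, marks_dict.getD i 0)]) []
      = marks_dict.items := by
    rw [PySem.List.foldl_append_singleton_eq_map, List.nil_append,
      ← PySem.Dict.items_eq_map_keys marks_dict hmknd 0]
  set SL := l.map (fun p => (p.1, grade_answersheet p.2 dm dak)) with hSL
  set sortedL := PySem.List.sorted SL (fun x => x.2) true with hsortedL
  have hsm : sort_marks marks_dict = sortedL.map
      (fun p => (p.1, p.2, 1 + cntGt (sortedL.map (fun q => q.2)) p.2)) := by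
    show ((PySem.List.sorted
        (marks_dict.keys.foldl (fun acc i => acc ++ [(i, marks_dict.getD i 0)]) [])
        (fun x => x.2) true).foldl sweepStep
        (([] : List (String × Int × Int)), (0 : Int), (none : Option Int))).1 = _
    rw [hml, hmd]
    exact sweep_top sortedL (PySem.List.sorted_pairwise_rev SL _)
  rw [hsm]
  have hfnd : ((sortedL.map
      (fun p => (p.1, p.2, 1 + cntGt (sortedL.map (fun q => q.2)) p.2))).map
      (fun i => i.1)).Nodup := by
    have h1 : (sortedL.map
        (fun p => (p.1, p.2, 1 + cntGt (sortedL.map (fun q => q.2)) p.2))).map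
        (fun i => i.1) = sortedL.map (fun p => p.1) := by
      simp [List.map_map, Function.comp]
    rw [h1]
    have hperm : (sortedL.map (fun p => p.1)).Perm (SL.map (fun p => p.1)) :=
      (PySem.List.sorted_perm SL _ true).map _
    have h2 : SL.map (fun p => p.1) = l.map Prod.fst := by
      rw [hSL, List.map_map]
      rfl
    rw [hperm.nodup_iff, h2]
    exact hnd
  rw [PySem.Dict.items_foldl_insert_fresh
      (sortedL.map (fun p => (p.1, p.2, 1 + cntGt (sortedL.map (fun q => q.2)) p.2)))
      (fun i => i.1) (fun i => [i.2.1, i.2.2]) PySem.Dict.empty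
      (fun a _ => PySem.Dict.contains_empty _) hfnd]
  show List.map _ _ = finalOf SL
  rw [finalOf, List.map_map]
  rfl

def bScore (keys : List String) (rows : List (List Int)) (response : String) : Int :=
  (keys.zip (rows.zip ((PySem.Str.split? response "#").getD []))).foldl
    (fun total t =>
      if t.1 = "add" then total + PySem.List.pyGetD t.2.1 0 0
      else if t.2.2 = "" then total
      else if PySem.Str.isIn t.2.2 t.1 then total + PySem.List.pyGetD t.2.1 0 0
      else total - PySem.List.pyGetD t.2.1 1 0) 0

lemma intCount_eq_cntGt (M : List Int) (c : Int) :
    (PySem.Set.ofList M).foldl (fun n dm => if c < dm then n + 1 else n) (0 : Int) = cntGt M c := by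
  rw [show (fun (n : Int) (dm : Int) => if c < dm then n + 1 else n)
      = (fun n dm => if (fun d => decide (c < d)) dm = true then n + 1 else n) by
    funext n dm; simp]
  rw [PySem.List.foldl_count_if (fun d => decide (c < d)) (PySem.Set.ofList M) 0]
  rw [cntGt]
  ring

lemma gradeB_eq (l : List (String × String)) (ms ak : String)
    (hnd : (l.map Prod.fst).Nodup) :
    grade_exam_alt l ms ak = finalOf (l.map (fun p => (p.1,
      bScore ((PySem.Str.split? ak "#").getD [])
        (((PySem.Str.split? ms "#").getD []).map
          (fun seg => ((PySem.Str.split? seg "_").getD []).map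
            (fun x => (PySem.Int.ofStr? x).getD 0))) p.2))) := by
  have hofl := items_ofList_nodup l hnd
  set K := (PySem.Str.split? ak "#").getD [] with hK
  set R := ((PySem.Str.split? ms "#").getD []).map
    (fun seg => ((PySem.Str.split? seg "_").getD []).map
      (fun x => (PySem.Int.ofStr? x).getD 0)) with hR
  show ((PySem.List.sorted ((PySem.Dict.ofList l).items.map
        (fun p => (p.1, bScore K R p.2))) (fun p => p.2) true).foldl
      (fun d p => d.insert p.1 [p.2, 1 +
        (PySem.Set.ofList ((PySem.List.sorted ((PySem.Dict.ofList l).items.map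
          (fun p => (p.1, bScore K R p.2))) (fun p => p.2) true).map (fun p => p.2))).foldl
          (fun n dm => if p.2 < dm then n + 1 else n) (0 : Int)])
      PySem.Dict.empty).items = _
  rw [hofl]
  set SL := l.map (fun p => (p.1, bScore K R p.2)) with hSL
  set sortedL := PySem.List.sorted SL (fun p => p.2) true with hsortedL
  have hfnd : (sortedL.map (fun p => p.1)).Nodup := by
    have hperm : (sortedL.map (fun p => p.1)).Perm (SL.map (fun p => p.1)) :=
      (PySem.List.sorted_perm SL _ true).map _
    have h2 : SL.map (fun p => p.1) = l.map Prod.fst := by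
      rw [hSL, List.map_map]
      rfl
    rw [hperm.nodup_iff, h2]
    exact hnd
  rw [PySem.Dict.items_foldl_insert_fresh sortedL (fun p => p.1)
      (fun p => [p.2, 1 + (PySem.Set.ofList (sortedL.map (fun p => p.2))).foldl
        (fun n dm => if p.2 < dm then n + 1 else n) (0 : Int)]) PySem.Dict.empty
      (fun a _ => PySem.Dict.contains_empty _) hfnd]
  show List.map _ _ = finalOf SL
  rw [finalOf]
  apply List.map_congr_left
  intro p hp
  rw [intCount_eq_cntGt]

-- ===== VERDICT (by name: the statement is the Claim_ definition above) =====
theorem grade_exam_spec : Claim_equal_grade_exam := by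
  intro l ms ak _ hpre
  unfold Spec_grade_exam
  obtain ⟨hnd, -, hlen, hresp⟩ := hpre
  rw [gradeA_eq l ms ak hnd, gradeB_eq l ms ak hnd]
  congr 1
  apply List.map_congr_left
  intro p hp
  have hlne : l ≠ [] := List.ne_nil_of_mem hp
  have hlen' := hlen.resolve_left hlne
  have hdm : decode_marking_scheme ms = ((PySem.Str.split? ms "#").getD []).map
      (fun seg => ((PySem.Str.split? seg "_").getD []).map
        (fun x => (PySem.Int.ofStr? x).getD 0)) := by
    rw [decode_marking_scheme, PySem.List.foldl_append_singleton_eq_map]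
    simp
  rw [Prod.ext_iff]
  refine ⟨rfl, ?_⟩
  show grade_answersheet p.2 (decode_marking_scheme ms) (decode_answerkey ak) = _
  rw [hdm]
  exact score_eq p.2 _ _ (by simpa using hlen'.1) (by simpa using hresp p hp)
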